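-- pv_equiv track=rewrite | github.com/schumy/programmingLab | Foglio3.py | occorrenze
-- ===== SOURCE A (Python) =====
-- def occorrenze(lista):
--     dizionario = dict()
--
--     for word in lista:
--         word = word.title()
--
--         if word not in dizionario:
--             dizionario[word] = 1
--         else:
--             dizionario[word] += 1
--
--     return dizionario
-- ===== SOURCE B (Python) =====
-- def occorrenze(lista):
--     titled = [w.title() for w in lista]
--     dizionario = dict()
--     for w in dict.fromkeys(titled):
--         dizionario[w] = titled.count(w)
--     return dizionario
-- ===== Notes on version B (the rewrite author's own statement) =====
-- stated objective: alternative
-- what changed: Replaces the single incremental counting pass with a distinct-keys-then-rescan strategy: title-case once, take distinct keys in first-appearance order via dict.fromkeys, and compute each count with list.count.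
import Mathlib
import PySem

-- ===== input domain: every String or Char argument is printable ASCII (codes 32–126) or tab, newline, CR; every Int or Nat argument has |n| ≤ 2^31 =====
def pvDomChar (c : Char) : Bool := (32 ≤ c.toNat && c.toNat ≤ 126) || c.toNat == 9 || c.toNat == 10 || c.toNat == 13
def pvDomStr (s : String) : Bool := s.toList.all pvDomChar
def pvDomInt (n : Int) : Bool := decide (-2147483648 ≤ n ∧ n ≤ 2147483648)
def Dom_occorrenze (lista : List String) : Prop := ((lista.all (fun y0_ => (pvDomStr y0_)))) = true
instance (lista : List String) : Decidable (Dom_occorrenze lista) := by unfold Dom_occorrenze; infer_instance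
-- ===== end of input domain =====

-- B replaces A's incremental counting pass with: title once, distinct keys in first-appearance order, then count each key by rescanning.
-- ===== PORT A =====
-- hand port of Python str.title() (exact on the ASCII domain: a char is uppercased
-- iff the previous char is not alphabetic, lowercased otherwise)
def pyTitleChars : List Char → Bool → List Char
  | [], _ => []
  | c :: cs, prevAlpha =>
    if PySem.Chars.isalpha c then
      (if prevAlpha then PySem.Chars.lowerChar c else PySem.Chars.upperChar c) :: pyTitleChars cs true
    else
      c :: pyTitleChars cs false

def pyTitle (s : String) : String := String.ofList (pyTitleChars s.toList false)

def occorrenze (lista : List String) : List (String × Int) :=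
  (lista.foldl
    (fun (d : PySem.Dict String Int) word =>
      let w := pyTitle word
      if ¬ d.contains w then d.insert w 1
      else d.insert w (d.getD w 0 + 1))
    PySem.Dict.empty).items

-- ===== PORT B =====
def occorrenze_alt (lista : List String) : List (String × Int) :=
  let titled := lista.map pyTitle
  ((PySem.List.dedup titled).foldl
    (fun (d : PySem.Dict String Int) w => d.insert w (titled.count w : Int))
    PySem.Dict.empty).items

-- ===== PRECONDITION & SPEC =====
def Spec_occorrenze (lista : List String) (out : List (String × Int)) : Prop := out = occorrenze_alt lista
instance (lista : List String) (out : List (String × Int)) : Decidable (Spec_occorrenze lista out) := by unfold Spec_occorrenze; infer_instance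

-- ===== CLAIM (what is proved, stated in full; the proofs are below) =====
def Claim_equal_occorrenze : Prop := ∀ (lista : List String), Dom_occorrenze lista → Spec_occorrenze lista (occorrenze lista)

-- ===== LEMMAS AND PROOFS =====

-- A's loop over lista equals the Counter fold over the title-cased list:
-- title-casing is lifted out, and the branch on membership collapses to the
-- single insert-getD+1 step (getD is 0 exactly when the key is absent)
theorem occorrenze_loop_eq_counter_fold (l : List String) (d : PySem.Dict String Int) :
    l.foldl
      (fun (d : PySem.Dict String Int) word =>
        let w := pyTitle word
        if ¬ d.contains w then d.insert w 1
        else d.insert w (d.getD w 0 + 1)) d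
    = (l.map pyTitle).foldl (fun d w => d.insert w (d.getD w 0 + 1)) d := by
  induction l generalizing d with
  | nil => rfl
  | cons a t ih =>
    simp only [List.foldl, List.map]
    rw [ih]
    by_cases h : d.contains (pyTitle a)
    · simp [h]
    · have h' : d.contains (pyTitle a) = false := eq_false_of_ne_true h
      simp [h, PySem.Dict.getD_of_not_contains d 0 h']

theorem occorrenze_eq_counter_items (lista : List String) :
    occorrenze lista = (PySem.Dict.counter (lista.map pyTitle)).items := by
  unfold occorrenze
  rw [occorrenze_loop_eq_counter_fold, PySem.Dict.foldl_insert_getD_add_one_eq_counter]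

theorem occorrenze_alt_eq (lista : List String) :
    occorrenze_alt lista
      = (PySem.Set.ofList (lista.map pyTitle)).map
          (fun k => (k, ((lista.map pyTitle).count k : Int))) := by
  show ((PySem.List.dedup (lista.map pyTitle)).foldl
      (fun (d : PySem.Dict String Int) w => d.insert w ((lista.map pyTitle).count w : Int))
      PySem.Dict.empty).items = _
  rw [PySem.List.dedup_eq_ofList]
  rw [PySem.Dict.items_foldl_insert_fresh
      (PySem.Set.ofList (lista.map pyTitle)) (fun a => a)
      (fun a => ((lista.map pyTitle).count a : Int)) PySem.Dict.empty
      (by intro a _; simp)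
      (by simpa using PySem.Set.nodup_ofList (lista.map pyTitle))]
  simp [PySem.Dict.empty]

-- ===== VERDICT (by name: the statement is the Claim_ definition above) =====
theorem occorrenze_spec : Claim_equal_occorrenze := by
  intro lista _
  unfold Spec_occorrenze
  rw [occorrenze_eq_counter_items, PySem.Dict.items_counter, occorrenze_alt_eq]
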